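-- pv_equiv track=rewrite | github.com/ALTA-DE1-N-Taufik-Kurrahman-04Sept2000/Basic-Programming-Part4 | problem2/main.py | draw_xyz
-- ===== SOURCE A (Python) =====
-- def draw_xyz(N):
--     pattern = ""
--     count = 1
--
--     for i in range(1, N + 1):
--         line = ""
--         for j in range(1, N + 1):
--             if count % 3 == 0:
--                 line += " X"
--             elif count % 2 == 0:
--                 line += " Z"
--             elif count % 2 == 1:
--                 line += " Y"
--             count += 1
--         pattern += line.strip() + " \n"
--
--     return pattern
-- ===== SOURCE B (Python) =====
-- TABLE = ["Y", "Z", "X", "Z", "Y", "X"]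
--
--
-- def draw_xyz(N):
--     n = max(N, 0)
--     flat = [TABLE[i % 6] for i in range(n * n)]
--     rows = [" ".join(flat[r * n:(r + 1) * n]) + " \n" for r in range(n)]
--     return "".join(rows)
-- ===== Notes on version B (the rewrite author's own statement) =====
-- stated objective: simpler
-- what changed: B replaces A's nested loops with a running counter, three-way modulo branching and per-row strip() by generating the flat N*N character sequence from a fixed period-six table indexed by the global position modulo six, then reshaping it into rows by slicing and joining.
import Mathlib
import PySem

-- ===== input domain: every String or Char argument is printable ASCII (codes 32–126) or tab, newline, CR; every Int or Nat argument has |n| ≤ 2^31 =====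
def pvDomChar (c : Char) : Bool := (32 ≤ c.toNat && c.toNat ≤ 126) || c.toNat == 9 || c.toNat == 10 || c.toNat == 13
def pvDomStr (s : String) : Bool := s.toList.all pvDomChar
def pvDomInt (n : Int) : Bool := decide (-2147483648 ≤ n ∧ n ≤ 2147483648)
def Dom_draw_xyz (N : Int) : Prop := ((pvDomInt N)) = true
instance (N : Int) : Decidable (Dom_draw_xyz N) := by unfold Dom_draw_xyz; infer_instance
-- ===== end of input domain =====

-- B replaces A's nested running-counter loops and three-way branch by generating the flat
-- N*N character sequence from a period-six table and reshaping it into rows by slicing (objective: simpler).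

-- ===== PORT A =====
-- loop bodies of A, factored as named helpers (same code, same state)
def drawStep (st2 : String × Int) (_j : Int) : String × Int :=
  let line := st2.1
  let count := st2.2
  let line :=
    if PySem.Int.mod count 3 = 0 then line ++ " X"
    else if PySem.Int.mod count 2 = 0 then line ++ " Z"
    else if PySem.Int.mod count 2 = 1 then line ++ " Y"
    else line
  (line, count + 1)

def drawBody (N : Int) (st : String × Int) (_i : Int) : String × Int :=
  let inner := (PySem.List.pyRange 1 (N + 1) 1).foldl drawStep (("" : String), st.2)
  (st.1 ++ PySem.Str.strip inner.1 ++ " \n", inner.2)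

def draw_xyz (N : Int) : String :=
  ((PySem.List.pyRange 1 (N + 1) 1).foldl (drawBody N) (("" : String), 1)).1

-- ===== PORT B =====
def pvTable : List String := ["Y", "Z", "X", "Z", "Y", "X"]

def draw_xyz_alt (N : Int) : String :=
  -- the table index (i mod six) always lies within the table, so the lookup never misses; pyGetD's default is unreachable
  let n := max N 0
  let flat := (PySem.List.pyRange 0 (n * n) 1).map
    (fun i => PySem.List.pyGetD pvTable (PySem.Int.mod i 6) "")
  let rows := (PySem.List.pyRange 0 n 1).map (fun r =>
    PySem.Str.join " " (PySem.List.slice flat (some (r * n)) (some ((r + 1) * n))) ++ " \n")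
  PySem.Str.join "" rows

-- ===== PRECONDITION & SPEC =====
def Spec_draw_xyz (N : Int) (out : String) : Prop := out = draw_xyz_alt N
instance (N : Int) (out : String) : Decidable (Spec_draw_xyz N out) := by unfold Spec_draw_xyz; infer_instance

-- ===== CLAIM (what is proved, stated in full; the proofs are below) =====
def Claim_equal_draw_xyz : Prop := ∀ (N : Int), Dom_draw_xyz N → Spec_draw_xyz N (draw_xyz N)

-- ===== LEMMAS AND PROOFS =====

-- the character A appends for counter value c
def chA (c : Int) : Char :=
  if c % 3 = 0 then 'X' else if c % 2 = 0 then 'Z' else 'Y'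

-- A's inner line as a char list: n cells starting at counter c
def segA (c : Int) : Nat → List Char
  | 0 => []
  | n + 1 => ' ' :: chA c :: segA (c + 1) n

theorem segA_snoc (n : Nat) : ∀ c : Int, segA c (n + 1) = segA c n ++ [' ', chA (c + n)] := by
  induction n with
  | zero => intro c; simp [segA]
  | succ m ih =>
      intro c
      show ' ' :: chA c :: segA (c + 1) (m + 1) = (' ' :: chA c :: segA (c + 1) m) ++ _
      rw [ih (c + 1)]
      simp; ring_nf

theorem chA_not_space (c : Int) : PySem.Chars.isspace (chA c) = false := by
  unfold chA; split_ifs <;> decide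

theorem rstrip_snoc (l : List Char) (a : Char) (h : PySem.Chars.isspace a = false) :
    PySem.Chars.rstrip (l ++ [a]) = l ++ [a] := by
  simp [PySem.Chars.rstrip, h]

theorem strip_segA (n : Nat) (c : Int) :
    PySem.Chars.strip (segA c (n + 1)) = chA c :: segA (c + 1) n := by
  have hl : PySem.Chars.lstrip (segA c (n + 1)) = chA c :: segA (c + 1) n := by
    simp [segA, PySem.Chars.lstrip, chA_not_space,
      (by decide : PySem.Chars.isspace ' ' = true)]
  unfold PySem.Chars.strip
  rw [hl]
  cases n with
  | zero => exact rstrip_snoc [] _ (chA_not_space c)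
  | succ m =>
      rw [segA_snoc m (c + 1)]
      have := rstrip_snoc (chA c :: (segA (c + 1) m ++ [' '])) (chA (c + 1 + m)) (chA_not_space _)
      simpa using this


theorem strip_segA_zero (c : Int) : PySem.Chars.strip (segA c 0) = [] := by
  simp [segA, PySem.Chars.strip, PySem.Chars.lstrip, PySem.Chars.rstrip]

-- the stripped row, defined recursively: characters interleaved with single spaces
def rowB : Int → Nat → List Char
  | _, 0 => []
  | c, 1 => [chA c]
  | c, n + 2 => chA c :: ' ' :: rowB (c + 1) (n + 1)

theorem cons_segA_eq_rowB : ∀ (n : Nat) (c : Int), chA c :: segA (c + 1) n = rowB c (n + 1)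
  | 0, c => by simp [segA, rowB]
  | n + 1, c => by
      show chA c :: ' ' :: chA (c + 1) :: segA (c + 1 + 1) n = _
      rw [cons_segA_eq_rowB n (c + 1)]
      rfl

theorem rowB_eq_join : ∀ (n : Nat) (c : Int),
    rowB c n = PySem.Chars.join [' '] ((List.range n).map (fun (j : Nat) => [chA (c + (j : Int))]))
  | 0, _ => by simp [rowB, PySem.Chars.join, List.intercalate]
  | 1, c => by simp [rowB, PySem.Chars.join_singleton]
  | n + 2, c => by
      have hmap : (List.range (n + 1)).map ((fun (j : Nat) => [chA (c + (j : Int))]) ∘ Nat.succ)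
          = (List.range (n + 1)).map (fun (j : Nat) => [chA (c + 1 + (j : Int))]) := by
        apply List.map_congr_left
        intro a _
        simp only [Function.comp]
        have h : c + ((Nat.succ a : Nat) : Int) = c + 1 + (a : Int) := by push_cast; ring
        rw [h]
      rw [List.range_succ_eq_map, List.map_cons, List.map_map, hmap]
      cases hE : (List.range (n + 1)).map (fun (j : Nat) => [chA (c + 1 + (j : Int))]) with
      | nil => exact absurd (congrArg List.length hE) (by simp)
      | cons hd tl =>
          rw [PySem.Chars.join_cons_cons]
          have ih := rowB_eq_join (n + 1) (c + 1)
          rw [hE] at ih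
          show chA c :: ' ' :: rowB (c + 1) (n + 1) = _
          rw [ih]
          simp

theorem rowB_of_strip (n : Nat) (c : Int) : PySem.Chars.strip (segA c n) = rowB c n := by
  cases n with
  | zero => simpa using strip_segA_zero c
  | succ m => rw [strip_segA m c, cons_segA_eq_rowB]

-- one output row of A as a char list
def rowA (c : Int) (n : Nat) : List Char := PySem.Chars.strip (segA c n) ++ [' ', '\n']

theorem toList_space_X : (" X" : String).toList = [' ', 'X'] := rfl
theorem toList_space_Z : (" Z" : String).toList = [' ', 'Z'] := rfl
theorem toList_space_Y : (" Y" : String).toList = [' ', 'Y'] := rfl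
theorem toList_space_nl : (" \n" : String).toList = [' ', '\n'] := rfl

theorem drawStep_fst_toList (s : String) (c : Int) (j : Int) :
    ((drawStep (s, c) j).1.toList = s.toList ++ [' ', chA c]) ∧ (drawStep (s, c) j).2 = c + 1 := by
  have h3 : PySem.Int.mod c 3 = c % 3 := PySem.Int.mod_eq_emod_of_pos (by norm_num)
  have h2 : PySem.Int.mod c 2 = c % 2 := PySem.Int.mod_eq_emod_of_pos (by norm_num)
  have hb2 : 0 ≤ c % 2 ∧ c % 2 < 2 := ⟨Int.emod_nonneg c (by norm_num), Int.emod_lt_of_pos c (by norm_num)⟩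
  unfold drawStep chA
  simp only [h3, h2]
  split_ifs with hA hB hC
  · simp [toList_space_X]
  · simp [toList_space_Z]
  · simp [toList_space_Y]
  · omega

theorem inner_fold : ∀ (l : List Int) (s : String) (c : Int),
    (l.foldl drawStep (s, c)).1.toList = s.toList ++ segA c l.length ∧
      (l.foldl drawStep (s, c)).2 = c + l.length
  | [], s, c => by simp [segA]
  | a :: t, s, c => by
      have hstep := drawStep_fst_toList s c a
      have ih := inner_fold t (drawStep (s, c) a).1 (drawStep (s, c) a).2
      simp only [Prod.mk.eta] at ih
      obtain ⟨ih1, ih2⟩ := ih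
      rw [hstep.1, hstep.2] at ih1
      rw [hstep.2] at ih2
      rw [List.foldl_cons]
      refine ⟨?_, ?_⟩
      · rw [ih1]
        simp [segA]
      · rw [ih2]
        simp only [List.length_cons]
        push_cast
        ring

theorem outer_fold (N : Int) (n : Nat) (hn : (PySem.List.pyRange 1 (N + 1) 1).length = n) :
    ∀ (l : List Int) (s : String) (c : Int),
      (l.foldl (drawBody N) (s, c)).1.toList
        = s.toList ++ (List.flatten ((List.range l.length).map (fun (r : Nat) => rowA (c + (r : Int) * (n : Int)) n))) ∧
      (l.foldl (drawBody N) (s, c)).2 = c + l.length * n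
  | [], s, c => by simp
  | a :: t, s, c => by
      have hinner := inner_fold (PySem.List.pyRange 1 (N + 1) 1) "" c
      rw [hn] at hinner
      have hbody1 : ((drawBody N (s, c) a).1).toList = s.toList ++ rowA c n := by
        unfold drawBody
        simp only [String.toList_append, PySem.Str.strip]
        rw [show ((PySem.List.pyRange 1 (N + 1) 1).foldl drawStep ("", c)).1.toList
              = "".toList ++ segA c n from hinner.1]
        simp [rowA, toList_space_nl]
      have hbody2 : (drawBody N (s, c) a).2 = c + n := by
        unfold drawBody
        exact hinner.2
      have ih := outer_fold N n hn t (drawBody N (s, c) a).1 (drawBody N (s, c) a).2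
      simp only [Prod.mk.eta] at ih
      obtain ⟨ih1, ih2⟩ := ih
      rw [hbody1, hbody2] at ih1
      rw [hbody2] at ih2
      rw [List.foldl_cons]
      refine ⟨?_, ?_⟩
      · rw [ih1]
        have hmap : (List.range t.length).map (fun (r : Nat) => rowA (c + (n : Int) + (r : Int) * (n : Int)) n)
            = (List.range t.length).map ((fun (r : Nat) => rowA (c + (r : Int) * (n : Int)) n) ∘ Nat.succ) := by
          apply List.map_congr_left
          intro r _
          simp only [Function.comp]
          have h : c + (n : Int) + (r : Int) * (n : Int) = c + ((Nat.succ r : Nat) : Int) * (n : Int) := by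
            push_cast; ring
          rw [h]
        rw [hmap]
        simp [List.range_succ_eq_map, List.map_map]
      · rw [ih2]
        simp only [List.length_cons]
        push_cast
        ring

theorem tbl_chA (i : Int) :
    (PySem.List.pyGetD pvTable (PySem.Int.mod i 6) "").toList = [chA (i + 1)] := by
  rw [PySem.Int.mod_eq_emod_of_pos (by norm_num : (0:Int) < 6)]
  have h0 : 0 ≤ i % 6 := Int.emod_nonneg i (by norm_num)
  have h1 : i % 6 < 6 := Int.emod_lt_of_pos i (by norm_num)
  have hsplit : i % 6 = 0 ∨ i % 6 = 1 ∨ i % 6 = 2 ∨ i % 6 = 3 ∨ i % 6 = 4 ∨ i % 6 = 5 := by omega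
  rcases hsplit with h | h | h | h | h | h <;> rw [h]
  · rw [show chA (i + 1) = 'Y' by
      simp [chA, (show ¬ (i+1) % 3 = 0 by omega), (show ¬ (i+1) % 2 = 0 by omega)]]
    decide
  · rw [show chA (i + 1) = 'Z' by
      simp [chA, (show ¬ (i+1) % 3 = 0 by omega), (show (i+1) % 2 = 0 by omega)]]
    decide
  · rw [show chA (i + 1) = 'X' by simp [chA, (show (i+1) % 3 = 0 by omega)]]
    decide
  · rw [show chA (i + 1) = 'Z' by
      simp [chA, (show ¬ (i+1) % 3 = 0 by omega), (show (i+1) % 2 = 0 by omega)]]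
    decide
  · rw [show chA (i + 1) = 'Y' by
      simp [chA, (show ¬ (i+1) % 3 = 0 by omega), (show ¬ (i+1) % 2 = 0 by omega)]]
    decide
  · rw [show chA (i + 1) = 'X' by simp [chA, (show (i+1) % 3 = 0 by omega)]]
    decide

theorem join_empty_sep : ∀ l : List (List Char), PySem.Chars.join [] l = l.flatten
  | [] => by simp [PySem.Chars.join, List.intercalate]
  | [a] => by simp [PySem.Chars.join_singleton]
  | a :: b :: t => by
      rw [PySem.Chars.join_cons_cons, join_empty_sep (b :: t)]
      simp

theorem take_drop_map_range (g : Nat → String) (m a n : Nat) (h : a + n ≤ m) :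
    (((List.range m).map g).drop a).take n = (List.range n).map (fun j => g (a + j)) := by
  apply List.ext_getElem
  · simp; omega
  · intro i h1 h2
    simp [List.getElem_take, List.getElem_drop]

theorem rowA_eq (c : Int) (n : Nat) : rowA c n = rowB c n ++ [' ', '\n'] := by
  rw [rowA, rowB_of_strip]

theorem draw_eq_rows (N : Int) (n : Nat) (hN : N = (n : Int)) :
    (draw_xyz N).toList
      = List.flatten ((List.range n).map (fun (r : Nat) => rowA (1 + (r : Int) * (n : Int)) n)) := by
  have hn : (PySem.List.pyRange 1 (N + 1) 1).length = n := by
    rw [PySem.List.length_pyRange_one]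
    omega
  unfold draw_xyz
  rw [(outer_fold N n hn (PySem.List.pyRange 1 (N + 1) 1) "" 1).1, hn]
  simp

set_option maxHeartbeats 1000000 in
theorem alt_eq_rows (N : Int) (n : Nat) (hN : N = (n : Int)) :
    (draw_xyz_alt N).toList
      = List.flatten ((List.range n).map (fun (r : Nat) => rowB ((r : Int) * (n : Int) + 1) n ++ [' ', '\n'])) := by
  subst hN
  simp only [draw_xyz_alt]
  rw [show max ((n : Nat) : Int) 0 = ((n : Nat) : Int) from max_eq_left (by positivity)]
  have hflat : (PySem.List.pyRange 0 ((n : Int) * (n : Int)) 1).map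
        (fun i => PySem.List.pyGetD pvTable (PySem.Int.mod i 6) "")
      = (List.range (n * n)).map
        (fun (k : Nat) => PySem.List.pyGetD pvTable (PySem.Int.mod (k : Int) 6) "") := by
    rw [PySem.List.pyRange_one, List.map_map]
    have harg : (((n : Int) * (n : Int)) - 0).toNat = n * n := by omega
    rw [harg]
    apply List.map_congr_left
    intro k _
    simp
  have hrows : (PySem.List.pyRange 0 (n : Int) 1) = (List.range n).map (fun (k : Nat) => (k : Int)) := by
    rw [PySem.List.pyRange_one]
    have harg : ((n : Int) - 0).toNat = n := by omega
    rw [harg]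
    apply List.map_congr_left
    intro k _
    simp
  rw [hflat, hrows, List.map_map]
  rw [PySem.Str.join, String.toList_ofList, show ("" : String).toList = [] from rfl,
      join_empty_sep, List.map_map]
  refine congrArg List.flatten ?_
  apply List.map_congr_left
  intro r hr
  have hr' : r < n := List.mem_range.mp hr
  simp only [Function.comp]
  rw [String.toList_append, toList_space_nl]
  congr 1
  rw [PySem.Str.join, String.toList_ofList, show (" " : String).toList = [' '] from rfl]
  have hc1 : ((r : Int) * (n : Int)) = ((r * n : Nat) : Int) := by push_cast; ring
  have hc2 : (((r : Int) + 1) * (n : Int)) = ((r * n + n : Nat) : Int) := by push_cast; ring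
  rw [hc1, hc2, PySem.List.slice_natCast]
  have hc3 : r * n + n - r * n = n := by omega
  rw [hc3]
  have hle : r * n + n ≤ n * n := by nlinarith
  rw [take_drop_map_range _ (n * n) (r * n) n hle]
  have hchars : ((List.range n).map (fun (j : Nat) =>
        PySem.List.pyGetD pvTable (PySem.Int.mod ((r * n + j : Nat) : Int) 6) "")).map String.toList
      = (List.range n).map (fun (j : Nat) => [chA (((r : Int) * (n : Int) + 1) + (j : Int))]) := by
    rw [List.map_map]
    apply List.map_congr_left
    intro j _
    simp only [Function.comp]
    rw [tbl_chA]
    have h : (((r * n + j : Nat) : Int) + 1) = ((r : Int) * (n : Int) + 1) + (j : Int) := by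
      push_cast; ring
    rw [h]
  rw [hchars, ← rowB_eq_join]
  congr 1

theorem draw_xyz_spec : Claim_equal_draw_xyz := by
  intro N _
  unfold Spec_draw_xyz
  apply String.ext
  by_cases hpos : 0 < N
  · have hN : N = ((N.toNat : Nat) : Int) := (Int.toNat_of_nonneg (le_of_lt hpos)).symm
    rw [draw_eq_rows N N.toNat hN, alt_eq_rows N N.toNat hN]
    congr 1
    apply List.map_congr_left
    intro r _
    rw [rowA_eq]
    have h : (1 + (r : Int) * (N.toNat : Int)) = ((r : Int) * (N.toNat : Int) + 1) := by ring
    rw [h]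
  · have h1 : PySem.List.pyRange 1 (N + 1) 1 = [] := PySem.List.pyRange_one_eq_nil (by omega)
    have hm : max N 0 = 0 := by omega
    unfold draw_xyz
    simp only [draw_xyz_alt, hm]
    rw [h1, show ((0 : Int) * 0) = 0 from by norm_num,
        PySem.List.pyRange_one_eq_nil (le_refl (0 : Int))]
    simp [PySem.Str.join, PySem.Chars.join, List.intercalate]
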